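-- pv_equiv track=rewrite | github.com/theo-rog/CodeAdvent2024 | Dec14.py | has_continuous_hashes
-- ===== SOURCE A (Python) =====
-- def has_continuous_hashes(row, n):
--     count = 0
--     for cell in row:
--         if cell == '#':
--             count += 1
--             if count >= n:
--                 return True
--         else:
--             count = 0
--     return False
-- ===== SOURCE B (Python) =====
-- def has_continuous_hashes(row, n):
--     # Two-pointer run scan: find each maximal run of '#' and test its length.
--     i, L = 0, len(row)
--     while i < L:
--         if row[i] == '#':
--             j = i + 1
--             while j < L and row[j] == '#':
--                 j += 1
--             if j - i >= n:
--                 return True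
--             i = j
--         else:
--             i += 1
--     return False
-- ===== Notes on version B (the rewrite author's own statement) =====
-- stated objective: alternative
-- what changed: Replaces the rolling reset-on-mismatch counter with a two-pointer scan that jumps over each maximal run of '#' and checks its length once.
import Mathlib
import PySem

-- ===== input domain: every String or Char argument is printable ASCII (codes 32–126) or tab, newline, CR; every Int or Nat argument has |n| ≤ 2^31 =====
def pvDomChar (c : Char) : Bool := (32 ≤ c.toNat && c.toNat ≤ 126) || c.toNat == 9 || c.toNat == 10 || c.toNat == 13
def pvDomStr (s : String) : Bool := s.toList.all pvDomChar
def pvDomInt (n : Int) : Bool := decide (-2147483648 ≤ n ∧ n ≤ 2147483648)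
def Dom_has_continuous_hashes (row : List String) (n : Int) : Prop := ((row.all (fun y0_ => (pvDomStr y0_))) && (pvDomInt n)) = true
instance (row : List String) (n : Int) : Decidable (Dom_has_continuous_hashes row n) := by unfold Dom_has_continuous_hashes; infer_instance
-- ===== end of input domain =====

-- B replaces A's rolling reset-on-mismatch counter with a two-pointer scan over
-- maximal runs of '#' (objective: alternative, same cost).

-- ===== PORT A =====
-- A's for-loop with its running counter, as structural recursion over (cells, count).
def hchGoA (n : Int) : List String → Int → Bool
  | [], _ => false
  | c :: rest, count =>
    if c == "#" then
      if count + 1 ≥ n then true else hchGoA n rest (count + 1)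
    else hchGoA n rest 0

def has_continuous_hashes (row : List String) (n : Int) : Bool := hchGoA n row 0

-- ===== PORT B =====
-- Source B's outer while loop over suffixes; the inner while loop (advance j over the
-- run) is takeWhile/dropWhile: j - i = 1 + length of the '#'-run after position i.
def hchGoB (n : Int) : List String → Bool
  | [] => false
  | c :: rest =>
    if c == "#" then
      if (1 + ((rest.takeWhile (fun s => s == "#")).length : Int)) ≥ n then true
      else hchGoB n (rest.dropWhile (fun s => s == "#"))
    else hchGoB n rest
termination_by l => l.length
decreasing_by
  · exact Nat.lt_succ_of_le (List.length_dropWhile_le _ _)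
  · simp

def has_continuous_hashes_alt (row : List String) (n : Int) : Bool := hchGoB n row

-- ===== PRECONDITION & SPEC =====
def Spec_has_continuous_hashes (row : List String) (n : Int) (out : Bool) : Prop := out = has_continuous_hashes_alt row n
instance (row : List String) (n : Int) (out : Bool) : Decidable (Spec_has_continuous_hashes row n out) := by unfold Spec_has_continuous_hashes; infer_instance

-- ===== CLAIM (what is proved, stated in full; the proofs are below) =====
def Claim_equal_has_continuous_hashes : Prop := ∀ (row : List String) (n : Int), Dom_has_continuous_hashes row n → Spec_has_continuous_hashes row n (has_continuous_hashes row n)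

-- ===== LEMMAS AND PROOFS =====

-- Inside a '#'-run with accumulated count < n, A either fires when the whole run
-- reaches n or resumes with counter 0 after the run.
lemma hchGoA_run (n : Int) : ∀ (cells : List String) (count : Int), count < n →
    hchGoA n cells count =
      (if count + ((cells.takeWhile (fun s => s == "#")).length : Int) ≥ n then true
       else hchGoA n (cells.dropWhile (fun s => s == "#")) 0) := by
  intro cells
  induction cells with
  | nil =>
    intro count h
    simp [hchGoA, List.takeWhile, List.dropWhile]
    omega
  | cons c rest ih =>
    intro count h
    by_cases hc : c == "#"
    · simp only [hchGoA, List.takeWhile_cons, List.dropWhile_cons, hc, if_true]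
      by_cases h1 : count + 1 ≥ n
      · have : count + ((1 : Int) + ((rest.takeWhile (fun s => s == "#")).length : Int)) ≥ n := by
          have : (0:Int) ≤ ((rest.takeWhile (fun s => s == "#")).length : Int) := by positivity
          omega
        simp only [List.length_cons]
        push_cast
        rw [if_pos h1]
        rw [if_pos (by omega)]
      · rw [if_neg h1]
        rw [ih (count + 1) (by omega)]
        simp only [List.length_cons]
        push_cast
        congr 1
        · simp only [eq_iff_iff, ge_iff_le]
          constructor <;> intro <;> omega
    · rw [hchGoA]
      simp only [List.takeWhile_cons, List.dropWhile_cons, hc, if_false,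
        Bool.false_eq_true, List.length_nil]
      rw [if_neg (by push_cast; omega)]
      rw [hchGoA]
      simp [hc]

lemma hchGoA_eq_hchGoB (n : Int) (cells : List String) : hchGoA n cells 0 = hchGoB n cells := by
  induction cells using hchGoB.induct n with
  | case1 => simp [hchGoA, hchGoB]
  | case2 c rest hc h1 =>
    rw [hchGoB]
    simp only [hc, if_true, if_pos h1]
    rw [hchGoA]
    simp only [hc, if_true, zero_add]
    by_cases h2 : (1 : Int) ≥ n
    · rw [if_pos h2]
    · rw [if_neg h2]
      rw [hchGoA_run n rest 1 (by omega)]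
      rw [if_pos (by omega)]
  | case3 c rest hc h1 ih =>
    rw [hchGoB]
    simp only [hc, if_true, if_neg h1]
    have h2 : ¬ ((1:Int) ≥ n) := by
      have : (0:Int) ≤ ((rest.takeWhile (fun s => s == "#")).length : Int) := by positivity
      omega
    rw [hchGoA]
    simp only [hc, if_true, zero_add]
    rw [if_neg h2]
    rw [hchGoA_run n rest 1 (by omega)]
    rw [if_neg (by omega)]
    exact ih
  | case4 c rest hc ih =>
    rw [hchGoB]
    simp only [hc]
    rw [hchGoA]
    simp only [hc]
    exact ih

-- ===== VERDICT (by name: the statement is the Claim_ definition above) =====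
theorem has_continuous_hashes_spec : Claim_equal_has_continuous_hashes := by
  intro row n _
  unfold Spec_has_continuous_hashes has_continuous_hashes has_continuous_hashes_alt
  exact hchGoA_eq_hchGoB n row
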